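-- pv_equiv track=rewrite | github.com/tanu1208/Python | assignment5/grep.py | create_pattern_dictionary
-- ===== SOURCE A (Python) =====
-- def create_pattern_dictionary(patterns):
--     """
--     Creates a dictionary with the patterns and a corresponding
--     color for that pattern.
--     Will recycle colors if the list of colors reach the end.
--     :param patterns: String containing the word patterns to search for
--     :return: pattern_dict
--     """
--
--     # Create a list of 23 different colors
--     # list of colors
--     color_list = [31, 32, 33, 34, 35, 36, 90, 91, 92, 93, 94, 95, 96]
--
--     # Create dict from pattern and colors
--     pattern_dict = {}
--     i = 0  # color counter
--     for pattern in patterns: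
--         if i == len(color_list):  # Recycles colors if reached end of list
--             i = 0
--         pattern_dict[pattern] = color_list[i]
--         i += 1
--     return pattern_dict
-- ===== SOURCE B (Python) =====
-- def create_pattern_dictionary(patterns):
--     """Chunked: walk the patterns in blocks of len(color_list); each whole
--     block is zipped against the color table and merged with one dict.update.
--     No per-element color counter or reset branch exists."""
--     color_list = [31, 32, 33, 34, 35, 36, 90, 91, 92, 93, 94, 95, 96]
--     pattern_dict = {}
--     start = 0
--     while start < len(patterns):
--         pattern_dict.update(zip(patterns[start:start + len(color_list)], color_list))
--         start += len(color_list)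
--     return pattern_dict
-- ===== Notes on version B (the rewrite author's own statement) =====
-- stated objective: alternative
-- what changed: Replaces A's per-element loop with a counter-and-reset branch by a chunked pass: the pattern list is sliced into blocks of 13 and each whole block is zipped against the color table and merged with dict.update, so no index variable or reset test exists.
import Mathlib
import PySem

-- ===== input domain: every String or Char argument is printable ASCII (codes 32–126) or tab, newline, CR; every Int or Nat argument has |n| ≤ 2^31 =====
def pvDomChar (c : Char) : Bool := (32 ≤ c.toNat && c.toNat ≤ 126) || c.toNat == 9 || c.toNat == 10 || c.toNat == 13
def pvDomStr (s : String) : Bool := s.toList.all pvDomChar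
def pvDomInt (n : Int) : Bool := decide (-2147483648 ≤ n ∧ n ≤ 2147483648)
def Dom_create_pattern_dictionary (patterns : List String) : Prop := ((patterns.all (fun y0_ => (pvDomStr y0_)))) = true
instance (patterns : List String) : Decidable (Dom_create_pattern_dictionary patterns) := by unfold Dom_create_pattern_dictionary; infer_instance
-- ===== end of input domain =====

-- B replaces A's per-element counter-with-reset loop by a chunked pass: slice the patterns into
-- blocks of 13 and dict-update each whole block zipped against the color table (alternative; same cost).

-- ===== PORT A =====
def pvColorListA : List Int := [31, 32, 33, 34, 35, 36, 90, 91, 92, 93, 94, 95, 96]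

-- literal port of A's loop: state is (pattern_dict, i); the reset branch 'if i == len(color_list): i = 0'
-- precedes the insert; color_list[i] is always in range, so '.getD 0' is never the default.
def create_pattern_dictionary (patterns : List String) : List (String × Int) :=
  (patterns.foldl
    (fun (st : PySem.Dict String Int × Int) pattern =>
      let i := if st.2 == (pvColorListA.length : Int) then 0 else st.2
      (st.1.insert pattern ((PySem.List.pyGet? pvColorListA i).getD 0), i + 1))
    (PySem.Dict.empty, 0)).1.items

-- ===== PORT B =====
def pvColorListB : List Int := [31, 32, 33, 34, 35, 36, 90, 91, 92, 93, 94, 95, 96]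

-- port of Source B's while loop: start walks 0, 13, 26, … (a Nat, faithfully: Python's start is a
-- nonnegative int counter); patterns[start:start+13] is a Python slice (PySem.List.slice) and
-- dict.update(zip(chunk, color_list)) is PySem.Dict.update of the zip (zip truncates to the
-- shorter list, as List.zip does).
def pvChunkLoop (d : PySem.Dict String Int) (start : Nat) (l : List String) : PySem.Dict String Int :=
  if h : start < l.length then
    pvChunkLoop
      (d.update (List.zip
        (PySem.List.slice l (some (start : Int)) (some ((start : Int) + (pvColorListB.length : Int))))
        pvColorListB))
      (start + pvColorListB.length) l
  else d
termination_by l.length - start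
decreasing_by
  have : 0 < pvColorListB.length := by simp [pvColorListB]
  omega

def create_pattern_dictionary_alt (patterns : List String) : List (String × Int) :=
  (pvChunkLoop PySem.Dict.empty 0 patterns).items

-- ===== PRECONDITION & SPEC =====
def Spec_create_pattern_dictionary (patterns : List String) (out : List (String × Int)) : Prop := out = create_pattern_dictionary_alt patterns
instance (patterns : List String) (out : List (String × Int)) : Decidable (Spec_create_pattern_dictionary patterns out) := by unfold Spec_create_pattern_dictionary; infer_instance

-- ===== CLAIM (what is proved, stated in full; the proofs are below) =====
def Claim_equal_create_pattern_dictionary : Prop := ∀ (patterns : List String), Dom_create_pattern_dictionary patterns → Spec_create_pattern_dictionary patterns (create_pattern_dictionary patterns)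

-- ===== LEMMAS AND PROOFS =====

-- Proof helper: B's chunk loop rephrased as structural recursion on the remaining suffix.
def pvTailLoop (d : PySem.Dict String Int) (rest : List String) : PySem.Dict String Int :=
  if rest = [] then d
  else pvTailLoop (d.update (List.zip (rest.take 13) pvColorListB)) (rest.drop 13)
termination_by rest.length
decreasing_by
  rename_i hne
  have : rest.length ≠ 0 := fun hn => hne (List.eq_nil_of_length_eq_zero hn)
  simp only [List.length_drop]
  omega

theorem pvTailLoop_nil (d : PySem.Dict String Int) : pvTailLoop d [] = d := by
  rw [pvTailLoop.eq_def]; simp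

theorem pvTailLoop_ne_nil (d : PySem.Dict String Int) (l : List String) (h : l ≠ []) :
    pvTailLoop d l = pvTailLoop (d.update (List.zip (l.take 13) pvColorListB)) (l.drop 13) := by
  rw [pvTailLoop.eq_def, if_neg h]

-- Chunk invariant for A's loop: starting with counter j ≤ 13, the loop first consumes
-- min(13 - j, |l|) elements, pairing them with the colors from index j on, and (if anything
-- is left) continues with counter reset to 0 on the remainder.
theorem cpd_chunk (l : List String) : ∀ (d : PySem.Dict String Int) (j : Nat), j ≤ 13 →
    (l.foldl
      (fun (st : PySem.Dict String Int × Int) pattern =>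
        let i := if st.2 == (pvColorListA.length : Int) then 0 else st.2
        (st.1.insert pattern ((PySem.List.pyGet? pvColorListA i).getD 0), i + 1))
      (d, (j : Int))).1 =
    if l.length + j ≤ 13 then d.update (List.zip l (pvColorListB.drop j))
    else ((l.drop (13 - j)).foldl
      (fun (st : PySem.Dict String Int × Int) pattern =>
        let i := if st.2 == (pvColorListA.length : Int) then 0 else st.2
        (st.1.insert pattern ((PySem.List.pyGet? pvColorListA i).getD 0), i + 1))
      (d.update (List.zip (l.take (13 - j)) (pvColorListB.drop j)), (0 : Int))).1 := by
  induction l with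
  | nil =>
    intro d j hj
    simp [PySem.Dict.update]
  | cons p l ih =>
    intro d j hj
    by_cases hj13 : j = 13
    · subst hj13
      rw [if_neg (by simp)]
      simp only [Nat.sub_self, List.take_zero, List.drop_zero, List.zip_nil_left]
      have hupd : d.update ([] : List (String × Int)) = d := rfl
      rw [hupd]
      simp only [List.foldl_cons]
      norm_num [pvColorListA]
    · -- j < 13
      have hjlt : j < 13 := lt_of_le_of_ne hj hj13
      have hne : ((j : Int) == (pvColorListA.length : Int)) = false := by
        simp [pvColorListA]; omega
      have hval : (PySem.List.pyGet? pvColorListA (j : Int)).getD 0 = pvColorListB[j]'(by simp [pvColorListB]; omega) := by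
        rw [show pvColorListA = pvColorListB from rfl, PySem.List.pyGet?_natCast,
          List.getElem?_eq_getElem (by simp [pvColorListB]; omega)]
        rfl
      have hdrop : pvColorListB.drop j
          = pvColorListB[j]'(by simp [pvColorListB]; omega) :: pvColorListB.drop (j + 1) :=
        List.drop_eq_getElem_cons (by simp [pvColorListB]; omega)
      simp only [List.foldl_cons, hne, if_false, Bool.false_eq_true]
      rw [hval]
      have hstep := ih (d.insert p (pvColorListB[j]'(by simp [pvColorListB]; omega))) (j + 1) (by omega)
      rw [show ((j : Int) + 1) = ((j + 1 : Nat) : Int) by push_cast; ring] at *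
      rw [hstep]
      by_cases hc : l.length + (j + 1) ≤ 13
      · rw [if_pos hc, if_pos (by simp; omega)]
        rw [hdrop, List.zip_cons_cons]
        rfl
      · rw [if_neg hc, if_neg (by simp; omega)]
        have h13 : 13 - j = (13 - (j + 1)) + 1 := by omega
        rw [h13, List.take_succ_cons, List.drop_succ_cons, hdrop, List.zip_cons_cons]
        rfl

-- A's loop starting with counter 0 equals B's chunked recursion.
theorem cpd_main : ∀ (n : Nat) (l : List String), l.length ≤ n → ∀ (d : PySem.Dict String Int),
    (l.foldl
      (fun (st : PySem.Dict String Int × Int) pattern =>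
        let i := if st.2 == (pvColorListA.length : Int) then 0 else st.2
        (st.1.insert pattern ((PySem.List.pyGet? pvColorListA i).getD 0), i + 1))
      (d, (0 : Int))).1 = pvTailLoop d l := by
  intro n
  induction n with
  | zero =>
    intro l hl d
    have : l = [] := List.eq_nil_of_length_eq_zero (by omega)
    subst this
    simp [pvTailLoop_nil]
  | succ n ih =>
    intro l hl d
    rcases eq_or_ne l [] with h | h
    · subst h; simp [pvTailLoop_nil]
    · rw [pvTailLoop_ne_nil d l h]
      have := cpd_chunk l d 0 (by omega)
      rw [show ((0:Nat) : Int) = (0 : Int) from rfl] at this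
      rw [this]
      by_cases hc : l.length + 0 ≤ 13
      · rw [if_pos hc]
        have hdrop : l.drop 13 = [] := List.drop_eq_nil_of_le (by omega)
        have htake : l.take 13 = l := List.take_of_length_le (by omega)
        rw [hdrop, htake, pvTailLoop_nil]
        simp
      · rw [if_neg hc]
        simp only [Nat.sub_zero]
        exact ih (l.drop 13) (by simp; omega) _


-- B's start-index chunk loop computes pvTailLoop on the suffix from start.
theorem pvChunkLoop_eq_tail : ∀ (n start : Nat) (l : List String), l.length - start ≤ n →
    ∀ (d : PySem.Dict String Int), pvChunkLoop d start l = pvTailLoop d (l.drop start) := by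
  intro n
  induction n with
  | zero =>
    intro start l hl d
    rw [pvChunkLoop.eq_def, dif_neg (by omega)]
    rw [List.drop_eq_nil_of_le (by omega), pvTailLoop_nil]
  | succ n ih =>
    intro start l hl d
    by_cases h : start < l.length
    · have hne : l.drop start ≠ [] := by
        intro hn; have := congrArg List.length hn; simp at this; omega
      rw [pvChunkLoop.eq_def, dif_pos h,
        PySem.List.slice_natCast_add l start pvColorListB.length,
        show pvColorListB.length = 13 from rfl,
        ih (start + 13) l (by omega),
        pvTailLoop_ne_nil d (l.drop start) hne, List.drop_drop]
    · rw [pvChunkLoop.eq_def, dif_neg h,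
        List.drop_eq_nil_of_le (by omega), pvTailLoop_nil]

-- ===== VERDICT (by name: the statement is the Claim_ definition above) =====
theorem create_pattern_dictionary_spec : Claim_equal_create_pattern_dictionary := by
  intro patterns _
  unfold Spec_create_pattern_dictionary create_pattern_dictionary create_pattern_dictionary_alt
  rw [cpd_main patterns.length patterns le_rfl PySem.Dict.empty,
    pvChunkLoop_eq_tail patterns.length 0 patterns (by omega) PySem.Dict.empty, List.drop_zero]
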